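-- pv_equiv track=rewrite | github.com/russellmiller49/proc_suite_notes | data/granular annotations/python_update_scripts_complete/991283.py | get_span
-- ===== SOURCE A (Python) =====
-- def get_span(text, term, occurrence=1):
--     """
--     Finds the start and end indices of the n-th occurrence of a term in the text.
--     """
--     start_index = -1
--     for _ in range(occurrence):
--         start_index = text.find(term, start_index + 1)
--         if start_index == -1:
--             raise ValueError(f"Term '{term}' not found {occurrence} times in text.")
--
--     return {
--         "start": start_index,
--         "end": start_index + len(term)
--     }
-- ===== SOURCE B (Python) =====
-- def get_span(text, term, occurrence=1):
--     """
--     Finds the start and end indices of the n-th occurrence of a term in the text.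
--
--     Single forward positional scan: at each position compare the substring of
--     the term's length, counting down the (overlapping) matches still needed.
--     """
--     m = len(term)
--     n = len(text) - m + 1
--     s = -1
--     remaining = occurrence
--     i = 0
--     while remaining > 0:
--         if i >= n:
--             raise ValueError(f"Term '{term}' not found {occurrence} times in text.")
--         if text[i:i + m] == term:
--             s = i
--             remaining -= 1
--         i += 1
--     return {"start": s, "end": s + m}
-- ===== Notes on version B (the rewrite author's own statement) =====
-- stated objective: alternative
-- what changed: Replaced A's stateful find-and-resume loop (repeated str.find resuming one past the previous hit) by a single forward positional scan that compares the slice at every index and counts down the overlapping matches still needed.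
import Mathlib
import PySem

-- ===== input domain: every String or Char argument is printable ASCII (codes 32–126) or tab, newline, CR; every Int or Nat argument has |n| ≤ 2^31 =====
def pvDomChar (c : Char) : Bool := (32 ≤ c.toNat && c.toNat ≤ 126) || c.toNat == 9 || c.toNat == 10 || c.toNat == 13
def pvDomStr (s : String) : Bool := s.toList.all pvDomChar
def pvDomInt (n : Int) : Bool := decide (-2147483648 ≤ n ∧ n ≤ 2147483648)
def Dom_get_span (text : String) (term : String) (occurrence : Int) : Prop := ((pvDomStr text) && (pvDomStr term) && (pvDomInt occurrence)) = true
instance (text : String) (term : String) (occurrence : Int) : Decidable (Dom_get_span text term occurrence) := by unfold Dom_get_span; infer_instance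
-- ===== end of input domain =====

-- B replaces A's find-and-resume loop by a single forward positional scan that compares
-- the slice at every index, counting down the matches still needed (objective: alternative).

-- ===== PORT A =====
-- the 'for _ in range(occurrence)' loop; none = the ValueError raise (excluded by Pre_)
def getSpanLoopA (text term : String) : Nat → Int → Option Int
  | 0, si => some si
  | k + 1, si =>
      let si' := PySem.Str.findFrom text term (si + 1) none
      if si' = -1 then none else getSpanLoopA text term k si'

def get_span (text : String) (term : String) (occurrence : Int) : List (String × Int) :=
  match getSpanLoopA text term occurrence.toNat (-1) with
  | some si => [("start", si), ("end", si + PySem.Str.len term)]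
  | none => []   -- raise ValueError: unreachable under Pre_

-- ===== PORT B =====
-- the 'while remaining > 0' loop; fuel = n - i, so fuel = 0 is 'i >= n';
-- none = the ValueError raise (unreachable under Pre_)
def getSpanLoopB (text term : String) (m : Int) : Nat → Int → Int → Int → Option Int
  | fuel, i, remaining, s =>
    if 0 < remaining then
      match fuel with
      | 0 => none
      | f + 1 =>
        if PySem.Str.slice text (some i) (some (i + m)) == term then
          getSpanLoopB text term m f (i + 1) (remaining - 1) i
        else
          getSpanLoopB text term m f (i + 1) remaining s
    else some s

def get_span_alt (text : String) (term : String) (occurrence : Int) : List (String × Int) :=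
  let m := PySem.Str.len term
  let n := PySem.Str.len text - m + 1
  match getSpanLoopB text term m n.toNat 0 occurrence (-1) with
  | some s => [("start", s), ("end", s + m)]
  | none => []

-- ===== PRECONDITION & SPEC =====
-- the (overlapping) occurrence positions of term in text
def pvMatchStarts (text term : String) : List Nat :=
  (List.range (text.toList.length + 1 - term.toList.length)).filter
    (fun j => decide (term.toList <+: text.toList.drop j))

-- Pre_ excludes exactly the inputs on which A raises ValueError:
-- a positive occurrence larger than the number of (overlapping) occurrences of term in text.
def Pre_get_span (text : String) (term : String) (occurrence : Int) : Prop :=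
  occurrence ≤ 0 ∨ occurrence ≤ ((pvMatchStarts text term).length : Int)
instance (text : String) (term : String) (occurrence : Int) : Decidable (Pre_get_span text term occurrence) := by unfold Pre_get_span; infer_instance

def pvWitness_get_span : String × String × Int := ("abcabc", "abc", 2)

def Spec_get_span (text : String) (term : String) (occurrence : Int) (out : List (String × Int)) : Prop := out = get_span_alt text term occurrence
instance (text : String) (term : String) (occurrence : Int) (out : List (String × Int)) : Decidable (Spec_get_span text term occurrence out) := by unfold Spec_get_span; infer_instance

-- ===== CLAIM (what is proved, stated in full; the proofs are below) =====
def Claim_equal_get_span : Prop := ∀ (text : String) (term : String) (occurrence : Int), Dom_get_span text term occurrence → Pre_get_span text term occurrence → Spec_get_span text term occurrence (get_span text term occurrence)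

-- ===== LEMMAS AND PROOFS =====

theorem pvMatchStarts_sorted (text term : String) :
    (pvMatchStarts text term).Pairwise (· < ·) :=
  List.Pairwise.filter _ (List.pairwise_lt_range)

theorem mem_pvMatchStarts {text term : String} {j : Nat} :
    j ∈ pvMatchStarts text term ↔
      term.toList <+: text.toList.drop j ∧ j + term.toList.length ≤ text.toList.length := by
  unfold pvMatchStarts
  simp only [List.mem_filter, List.mem_range, decide_eq_true_eq]
  constructor
  · rintro ⟨hj, hp⟩
    refine ⟨hp, ?_⟩
    have := hp.length_le
    simp only [List.length_drop] at this
    omega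
  · rintro ⟨hp, hj⟩
    have := hp.length_le
    simp only [List.length_drop] at this
    exact ⟨by omega, hp⟩

-- getElem of a strictly increasing list is strictly monotone
theorem pvSorted_get_lt {S : List Nat} (hS : S.Pairwise (· < ·)) {a b : Nat}
    (hab : a < b) (hb : b < S.length) : S[a]'(hab.trans hb) < S[b] :=
  (List.pairwise_iff_getElem.mp hS) a b (hab.trans hb) hb hab

-- the core bridge: findFrom from k returns the i-th match start when all earlier
-- match starts are below k and k is at most the i-th one
theorem findFrom_eq_match (text term : String) (i k : Nat)
    (hi : i < (pvMatchStarts text term).length)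
    (hk : k ≤ text.toList.length)
    (hlow : ∀ t (ht : t < i), (pvMatchStarts text term)[t]'(ht.trans hi) < k)
    (hup : k ≤ (pvMatchStarts text term)[i]) :
    PySem.Chars.findFrom text.toList term.toList (k : Int) none
      = ((pvMatchStarts text term)[i] : Int) := by
  have hmemI : (pvMatchStarts text term)[i] ∈ pvMatchStarts text term := List.getElem_mem hi
  have hI := mem_pvMatchStarts.mp hmemI
  -- term occurs in text.toList.drop k
  have hinf : term.toList <:+: text.toList.drop k := by
    have hdrop : text.toList.drop (pvMatchStarts text term)[i]
        = (text.toList.drop k).drop ((pvMatchStarts text term)[i] - k) := by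
      rw [List.drop_drop]; congr 1; omega
    have hpx : term.toList <+: (text.toList.drop k).drop ((pvMatchStarts text term)[i] - k) :=
      hdrop ▸ hI.1
    exact hpx.isInfix.trans (List.drop_suffix _ _).isInfix
  have hne : PySem.Chars.findFrom text.toList term.toList (k : Int) none ≠ -1 := by
    rw [Ne, PySem.Chars.findFrom_natCast_eq_neg_one_iff text.toList term.toList k hk]
    simpa using hinf
  obtain ⟨hkF, hpref, hmin⟩ :=
    PySem.Chars.findFrom_natCast_spec text.toList term.toList k hk hne
  -- F ≤ length of text
  have hFlen : PySem.Chars.findFrom text.toList term.toList (k : Int) none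
      ≤ (text.toList.length : Int) := by
    have hrw := PySem.Chars.findFrom_natCast text.toList term.toList k hk
    rw [hrw] at hne ⊢
    split at hne
    · simp at hne
    · split
      · simp_all
      · have h1 := PySem.Chars.find_le_length (text.toList.drop k) term.toList
        simp only [List.length_drop] at h1
        omega
  have hF0 : (0 : Int) ≤ PySem.Chars.findFrom text.toList term.toList (k : Int) none :=
    le_trans (Int.natCast_nonneg k) hkF
  -- F.toNat is a match start
  have hFmem : (PySem.Chars.findFrom text.toList term.toList (k : Int) none).toNat
      ∈ pvMatchStarts text term := by
    rw [mem_pvMatchStarts]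
    refine ⟨hpref, ?_⟩
    have := hpref.length_le
    simp only [List.length_drop] at this
    omega
  -- F.toNat ≤ the i-th start, by minimality of findFrom
  have hF_le : (PySem.Chars.findFrom text.toList term.toList (k : Int) none).toNat
      ≤ (pvMatchStarts text term)[i] := by
    by_contra h
    exact hmin (pvMatchStarts text term)[i] hup (by omega) hI.1
  -- the i-th start ≤ F.toNat, via sortedness
  have hle : (pvMatchStarts text term)[i]
      ≤ (PySem.Chars.findFrom text.toList term.toList (k : Int) none).toNat := by
    obtain ⟨t, ht, hteq⟩ := List.mem_iff_getElem.mp hFmem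
    rcases lt_or_ge t i with hti | hti
    · exfalso
      have h1 := hlow t hti
      omega
    · calc (pvMatchStarts text term)[i] ≤ (pvMatchStarts text term)[t] := by
            rcases eq_or_lt_of_le hti with h | h
            · exact le_of_eq (by subst h; rfl)
            · exact le_of_lt (pvSorted_get_lt (pvMatchStarts_sorted text term) h ht)
        _ = _ := hteq
  omega

-- trailing value of A's loop: after i successful finds the state is pvValA i
def pvValA (text term : String) : Nat → Int
  | 0 => -1
  | j + 1 => (((pvMatchStarts text term).getD j 0 : Nat) : Int)

theorem loopA_spec (text term : String) :
    ∀ (c i : Nat), i + c ≤ (pvMatchStarts text term).length →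
      getSpanLoopA text term c (pvValA text term i) = some (pvValA text term (i + c)) := by
  intro c
  induction c with
  | zero => intro i _; simp [getSpanLoopA]
  | succ c ih =>
    intro i hic
    have hi : i < (pvMatchStarts text term).length := by omega
    have hstep : PySem.Str.findFrom text term (pvValA text term i + 1) none
        = ((pvMatchStarts text term)[i] : Int) := by
      rw [PySem.Str.findFrom_eq]
      rcases i with _ | j
      · have h01 : pvValA text term 0 + 1 = ((0 : Nat) : Int) := by simp [pvValA]
        rw [h01]
        exact findFrom_eq_match text term 0 0 hi (by omega)
          (by intro t ht; omega) (by omega)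
      · have hj : j < (pvMatchStarts text term).length := by omega
        have hgd : (pvMatchStarts text term).getD j 0 = (pvMatchStarts text term)[j] :=
          List.getD_eq_getElem _ 0 hj
        have hv1 : pvValA text term (j+1) + 1
            = (((pvMatchStarts text term)[j] + 1 : Nat) : Int) := by
          simp only [pvValA]; rw [hgd]; push_cast; ring
        rw [hv1]
        have hjlast : j + 1 < (pvMatchStarts text term).length := hi
        have hSjlt : (pvMatchStarts text term)[j] < (pvMatchStarts text term)[j+1] :=
          pvSorted_get_lt (pvMatchStarts_sorted text term) (by omega) hjlast
        have hS1 := mem_pvMatchStarts.mp (List.getElem_mem hjlast)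
        refine findFrom_eq_match text term (j+1) ((pvMatchStarts text term)[j]+1) hjlast
          (by omega) ?_ (by omega)
        intro t ht
        have : (pvMatchStarts text term)[t]'(ht.trans hjlast) ≤ (pvMatchStarts text term)[j] := by
          rcases eq_or_lt_of_le (Nat.lt_succ_iff.mp ht) with h | h
          · exact le_of_eq (by congr 1)
          · exact le_of_lt (pvSorted_get_lt (pvMatchStarts_sorted text term) h hj)
        omega
    show getSpanLoopA text term (c+1) (pvValA text term i) = _
    rw [getSpanLoopA]
    simp only [hstep]
    rw [if_neg (by
      have : (0:Int) ≤ (((pvMatchStarts text term)[i] : Nat) : Int) := Int.natCast_nonneg _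
      omega)]
    have hval : (((pvMatchStarts text term)[i] : Nat) : Int) = pvValA text term (i+1) := by
      simp only [pvValA]; rw [List.getD_eq_getElem _ 0 hi]
    rw [hval]
    rw [ih (i+1) (by omega), show i+1+c = i+(c+1) from by omega]

-- 'text[i:i+m] == term' at position j is 'term is a prefix of text from j'
theorem slice_beq_term (text term : String) (j : Nat) :
    (PySem.Str.slice text (some (j : Int)) (some ((j : Int) + PySem.Str.len term)) == term)
      = decide (term.toList <+: text.toList.drop j) := by
  have hlent : PySem.Str.len term = (term.toList.length : Int) := by
    simp [PySem.Str.len_eq]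
  rw [hlent]
  have hslice : (PySem.Str.slice text (some (j:Int))
      (some (((j + term.toList.length : Nat)) : Int))).toList
      = (text.toList.drop j).take term.toList.length := by
    rw [PySem.Str.toList_slice]
    have := PySem.List.slice_natCast_add text.toList j term.toList.length
    rw [show ((j:Int) + (term.toList.length : Int)) = (((j + term.toList.length : Nat)) : Int)
      by push_cast; ring] at this
    exact this
  rw [show ((j:Int) + (term.toList.length:Int)) = (((j + term.toList.length : Nat)) : Int)
    by push_cast; ring]
  rw [Bool.eq_iff_iff, beq_iff_eq, decide_eq_true_eq]
  rw [String.ext_iff, hslice]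
  constructor
  · intro h
    rw [List.prefix_iff_eq_take]
    exact h.symm
  · intro h
    exact (List.prefix_iff_eq_take.mp h).symm

-- matches at positions ≥ i (the part of the scan B has not passed yet)
def pvTail (text term : String) (i : Nat) : List Nat :=
  (pvMatchStarts text term).filter (fun j => decide (i ≤ j))

-- peeling one position off a strictly increasing list's ≥-filter
theorem filter_ge_step {L : List Nat} (hL : L.Pairwise (· < ·)) (i : Nat) :
    L.filter (fun j => decide (i ≤ j))
      = (if i ∈ L then [i] else []) ++ L.filter (fun j => decide (i + 1 ≤ j)) := by
  induction L with
  | nil => simp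
  | cons a t ih =>
    have ha : ∀ b ∈ t, a < b := (List.pairwise_cons.mp hL).1
    have ht : t.Pairwise (· < ·) := (List.pairwise_cons.mp hL).2
    rcases lt_trichotomy a i with h | h | h
    · have e1 : List.filter (fun j => decide (i ≤ j)) (a :: t)
          = List.filter (fun j => decide (i ≤ j)) t := by
        rw [List.filter_cons, if_neg (by simp only [decide_eq_true_eq]; omega)]
      have e2 : List.filter (fun j => decide (i + 1 ≤ j)) (a :: t)
          = List.filter (fun j => decide (i + 1 ≤ j)) t := by
        rw [List.filter_cons, if_neg (by simp only [decide_eq_true_eq]; omega)]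
      have hmem : (i ∈ a :: t) ↔ (i ∈ t) := by
        constructor
        · intro hx
          rcases List.mem_cons.mp hx with h' | h'
          · exact absurd h' (by omega)
          · exact h'
        · intro hx
          exact List.mem_cons_of_mem a hx
      rw [e1, e2, ih ht]
      congr 1
      simp only [hmem]
    · subst h
      have hfil : t.filter (fun j => decide (a ≤ j)) = t.filter (fun j => decide (a + 1 ≤ j)) := by
        refine List.filter_congr ?_
        intro b hb
        have := ha b hb
        simp only [decide_eq_decide]
        omega
      have e1 : List.filter (fun j => decide (a ≤ j)) (a :: t)
          = a :: List.filter (fun j => decide (a ≤ j)) t := by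
        rw [List.filter_cons, if_pos (by simp)]
      have e2 : List.filter (fun j => decide (a + 1 ≤ j)) (a :: t)
          = List.filter (fun j => decide (a + 1 ≤ j)) t := by
        rw [List.filter_cons, if_neg (by simp)]
      rw [e1, e2, hfil, if_pos (List.mem_cons_self)]
      rfl
    · have hnm : i ∉ a :: t := by
        intro hx
        rcases List.mem_cons.mp hx with h' | h'
        · omega
        · exact absurd (ha i h') (by omega)
      have hfil : t.filter (fun j => decide (i ≤ j)) = t.filter (fun j => decide (i + 1 ≤ j)) := by
        refine List.filter_congr ?_
        intro b hb
        have := ha b hb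
        simp only [decide_eq_decide]
        omega
      have e1 : List.filter (fun j => decide (i ≤ j)) (a :: t)
          = a :: List.filter (fun j => decide (i ≤ j)) t := by
        rw [List.filter_cons, if_pos (by simp only [decide_eq_true_eq]; omega)]
      have e2 : List.filter (fun j => decide (i + 1 ≤ j)) (a :: t)
          = a :: List.filter (fun j => decide (i + 1 ≤ j)) t := by
        rw [List.filter_cons, if_pos (by simp only [decide_eq_true_eq]; omega)]
      rw [e1, e2, hfil, if_neg hnm]
      rfl

theorem mem_pvMatchStarts_of_lt {text term : String} {j : Nat}
    (hj : j < text.toList.length + 1 - term.toList.length) :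
    j ∈ pvMatchStarts text term ↔ term.toList <+: text.toList.drop j := by
  rw [mem_pvMatchStarts]
  constructor
  · exact And.left
  · intro hp
    exact ⟨hp, by omega⟩

theorem pvTail_end (text term : String) :
    pvTail text term (text.toList.length + 1 - term.toList.length) = [] := by
  unfold pvTail
  rw [List.filter_eq_nil_iff]
  intro j hj
  have := (List.mem_filter.mp (by exact hj : j ∈ pvMatchStarts text term)).1
  have hjN : j < text.toList.length + 1 - term.toList.length := List.mem_range.mp this
  simp only [decide_eq_true_eq]
  omega

-- B's loop, with fuel = n - i, returns the (remaining)-th of the matches not yet passed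
theorem loopB_spec (text term : String) :
    ∀ (fuel iN : Nat) (remaining s : Int),
      iN + fuel = text.toList.length + 1 - term.toList.length →
      getSpanLoopB text term (PySem.Str.len term) fuel (iN : Int) remaining s
        = if 0 < remaining
          then ((pvTail text term iN)[remaining.toNat - 1]?).map (fun j => (j : Int))
          else some s := by
  intro fuel
  induction fuel with
  | zero =>
    intro iN remaining s hN
    rw [getSpanLoopB]
    split
    · rw [show iN = text.toList.length + 1 - term.toList.length from by omega, pvTail_end]
      simp
    · rfl
  | succ f ih =>
    intro iN remaining s hN
    rw [getSpanLoopB]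
    split
    · rename_i hrem
      have hiN : iN < text.toList.length + 1 - term.toList.length := by omega
      rw [slice_beq_term text term iN]
      have hcast : (iN : Int) + 1 = ((iN + 1 : Nat) : Int) := by push_cast; ring
      by_cases hp : term.toList <+: text.toList.drop iN
      · rw [if_pos (by simp [hp])]
        rw [hcast, ih (iN + 1) (remaining - 1) iN (by omega)]
        have hstep : pvTail text term iN = iN :: pvTail text term (iN + 1) := by
          unfold pvTail
          rw [filter_ge_step (pvMatchStarts_sorted text term) iN,
            if_pos ((mem_pvMatchStarts_of_lt hiN).mpr hp)]
          rfl
        rw [hstep]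
        by_cases h1 : remaining = 1
        · subst h1
          simp
        · rw [if_pos (by omega)]
          have hidx : remaining.toNat - 1 = (remaining.toNat - 2) + 1 := by omega
          have hidx2 : (remaining - 1).toNat - 1 = remaining.toNat - 2 := by omega
          rw [hidx, hidx2, List.getElem?_cons_succ]
      · rw [if_neg (by simp [hp])]
        rw [hcast, ih (iN + 1) remaining s (by omega)]
        have hstep : pvTail text term iN = pvTail text term (iN + 1) := by
          unfold pvTail
          rw [filter_ge_step (pvMatchStarts_sorted text term) iN,
            if_neg (fun hm => hp ((mem_pvMatchStarts_of_lt hiN).mp hm))]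
          rfl
        rw [hstep, if_pos hrem]
    · rfl

theorem pvTail_zero (text term : String) : pvTail text term 0 = pvMatchStarts text term := by
  unfold pvTail
  simp

theorem fuel_eq (text term : String) :
    (PySem.Str.len text - PySem.Str.len term + 1).toNat
      = text.toList.length + 1 - term.toList.length := by
  have h1 : PySem.Str.len text = (text.toList.length : Int) := by simp [PySem.Str.len_eq]
  have h2 : PySem.Str.len term = (term.toList.length : Int) := by simp [PySem.Str.len_eq]
  rw [h1, h2]
  omega

theorem get_span_spec : Claim_equal_get_span := by
  unfold Claim_equal_get_span
  intro text term occurrence _ hpre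
  unfold Spec_get_span get_span get_span_alt
  have hB := loopB_spec text term
    (text.toList.length + 1 - term.toList.length) 0 occurrence (-1) (by omega)
  rw [Nat.cast_zero] at hB
  simp only [fuel_eq text term, hB, pvTail_zero]
  rcases le_or_gt occurrence 0 with hocc | hocc
  · -- occurrence <= 0: A's loop runs zero times, B's while loop never enters
    have h0 : occurrence.toNat = 0 := by omega
    rw [h0, if_neg (by omega)]
    simp [getSpanLoopA]
  · -- occurrence >= 1: both produce the (occurrence-1)-th match start
    have hple : occurrence ≤ ((pvMatchStarts text term).length : Int) := by
      rcases hpre with h | h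
      · omega
      · exact h
    have hocceq : occurrence = ((occurrence.toNat : Nat) : Int) := by omega
    generalize hgen : occurrence.toNat = c at hocceq
    rw [hocceq] at hple hocc ⊢
    have hc1 : 1 ≤ c := by omega
    have hcm1 : c - 1 < (pvMatchStarts text term).length := by omega
    have hA := loopA_spec text term c 0 (by omega)
    rw [Nat.zero_add] at hA
    rw [show pvValA text term 0 = -1 from rfl] at hA
    rw [hA]
    have hvalc : pvValA text term c = ((pvMatchStarts text term)[c-1]'hcm1 : Int) := by
      obtain ⟨d, hd⟩ := Nat.exists_eq_add_of_le hc1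
      subst hd
      simp only [Nat.add_comm 1 d]
      simp only [pvValA, Nat.add_sub_cancel]
      rw [List.getD_eq_getElem _ 0 (by omega : d < (pvMatchStarts text term).length)]
    rw [hvalc, if_pos (by omega)]
    simp [List.getElem?_eq_getElem hcm1]
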